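-- pv_equiv track=rewrite | github.com/joojaeyoon/PS | LINE/04.py | solution
-- ===== SOURCE A (Python) =====
-- def solution(dataSource, tags):
--     docs = []
--
--     for data in dataSource:
--         count = 0
--         for tag in tags:
--             if tag in data:
--                 count += 1
--         if count != 0:
--             docs.append([data[0], count])
--
--     for i in range(len(docs)-1):
--         for j in range(i+1, len(docs)):
--             if docs[i][1] < docs[j][1] or (docs[i][1] == docs[j][1] and docs[i][0] > docs[j][0]):
--                 docs[i], docs[j] = docs[j], docs[i]
--
--     answer = [doc[0] for doc in docs][:10]
--
--     return answer
-- ===== SOURCE B (Python) =====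
-- def solution(dataSource, tags):
--     buckets = {}
--     for d in dataSource:
--         s = sum(1 for t in tags if t in d)
--         if s:
--             buckets.setdefault(s, []).append(d[0])
--     answer = []
--     for c in range(len(tags), 0, -1):
--         answer += sorted(buckets.get(c, []))
--     return answer[:10]
-- ===== Notes on version B (the rewrite author's own statement) =====
-- stated objective: alternative
-- what changed: Replaces A's in-place quadratic exchange sort of (id,count) pairs by a score-indexed dict of buckets (count -> ids) built in one pass, then traversed with counts descending and each bucket's ids sorted ascending, so no comparison sort over the pairs is performed.
import Mathlib
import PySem

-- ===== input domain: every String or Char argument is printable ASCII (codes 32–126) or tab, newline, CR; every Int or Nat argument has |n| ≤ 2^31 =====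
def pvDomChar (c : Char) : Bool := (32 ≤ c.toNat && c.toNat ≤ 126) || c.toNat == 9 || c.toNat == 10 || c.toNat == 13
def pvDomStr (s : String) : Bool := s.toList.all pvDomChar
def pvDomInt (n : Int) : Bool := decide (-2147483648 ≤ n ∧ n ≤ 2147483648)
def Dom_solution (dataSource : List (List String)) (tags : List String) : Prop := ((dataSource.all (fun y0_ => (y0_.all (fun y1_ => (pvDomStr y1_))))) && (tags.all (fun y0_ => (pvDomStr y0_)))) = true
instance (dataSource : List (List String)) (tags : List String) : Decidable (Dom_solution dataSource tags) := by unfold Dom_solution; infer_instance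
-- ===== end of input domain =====

-- B replaces A's in-place quadratic exchange sort of (id,count) pairs by a score-indexed
-- traversal (counts from len(tags) down to 1, ids of each count ascending); return values agree.

-- ===== PORT A =====
-- the swap condition of A's double loop: docs[i][1] < docs[j][1] or (== and docs[i][0] > docs[j][0])
def ltSwap (p q : String × Int) : Bool := p.2 < q.2 || (p.2 == q.2 && decide (q.1 < p.1))

def solution (dataSource : List (List String)) (tags : List String) : List String :=
  -- first loop: build docs = [[data[0], count], …] for count ≠ 0
  let docs : List (String × Int) := dataSource.foldl (fun docs data =>
    let count : Int := tags.foldl (fun c tag => if data.contains tag then c + 1 else c) 0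
    if count ≠ 0 then
      -- data[0]: count ≠ 0 forces data ≠ [], so headD is exact here (Python never raises)
      docs ++ [(data.headD "", count)]
    else docs) []
  -- the in-place exchange sort: for i in range(len(docs)-1): for j in range(i+1, len(docs)): swap
  let n : Int := docs.length
  let docs := (PySem.List.pyRange 0 (n - 1) 1).foldl (fun ds i =>
    (PySem.List.pyRange (i + 1) n 1).foldl (fun ds j =>
      let di := PySem.List.pyGetD ds i ("", 0)
      let dj := PySem.List.pyGetD ds j ("", 0)
      if ltSwap di dj then PySem.List.pySetD (PySem.List.pySetD ds i dj) j di else ds) ds) docs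
  -- answer = [doc[0] for doc in docs][:10]
  PySem.List.slice (docs.map (fun doc => doc.1)) none (some 10)

-- ===== PORT B =====
-- s = sum(1 for t in tags if t in d): the number of tags contained in d
def scoreB (tags : List String) (d : List String) : Int := ((tags.filter (fun t => d.contains t)).length : Int)

def solution_alt (dataSource : List (List String)) (tags : List String) : List String :=
  -- buckets: match count -> ids in row order; s ≠ 0 forces d ≠ [], so headD is exact (Python never raises);
  -- buckets.setdefault(s, []).append(d[0]) = insert s (current list ++ [d[0]]) (first-insertion key order kept)
  let buckets : PySem.Dict Int (List String) := dataSource.foldl (fun b d =>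
    let s : Int := scoreB tags d
    if s ≠ 0 then b.insert s ((b.getD s []) ++ [d.headD ""]) else b) PySem.Dict.empty
  -- answer += sorted(buckets.get(c, [])), c from len(tags) down to 1
  let answer : List String := (PySem.List.pyRange (tags.length : Int) 0 (-1)).foldl (fun acc c =>
    acc ++ PySem.List.sorted (buckets.getD c []) (fun x => x) false) []
  PySem.List.slice answer none (some 10)

-- ===== PRECONDITION & SPEC =====
def Spec_solution (dataSource : List (List String)) (tags : List String) (out : List String) : Prop := out = solution_alt dataSource tags
instance (dataSource : List (List String)) (tags : List String) (out : List String) : Decidable (Spec_solution dataSource tags out) := by unfold Spec_solution; infer_instance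

-- ===== CLAIM (what is proved, stated in full; the proofs are below) =====
def Claim_equal_solution : Prop := ∀ (dataSource : List (List String)) (tags : List String), Dom_solution dataSource tags → Spec_solution dataSource tags (solution dataSource tags)

-- ===== LEMMAS AND PROOFS =====

-- the order A's exchange sort establishes: count descending, then id ascending
def ordR (p q : String × Int) : Prop := q.2 < p.2 ∨ (p.2 = q.2 ∧ p.1 ≤ q.1)

theorem ordR_of_not_ltSwap (p q : String × Int) (h : ltSwap p q = false) : ordR p q := by
  unfold ltSwap at h
  simp only [Bool.or_eq_false_iff, Bool.and_eq_false_iff, decide_eq_false_iff_not, not_lt,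
    beq_eq_false_iff_ne, ne_eq] at h
  obtain ⟨h1, h2⟩ := h
  unfold ordR
  by_cases hc : p.2 = q.2
  · rcases h2 with h2 | h2
    · exact absurd hc h2
    · exact Or.inr ⟨hc, not_lt.mp h2⟩
  · exact Or.inl (by omega)

theorem ordR_of_ltSwap (p q : String × Int) (h : ltSwap p q = true) : ordR q p ∧ p ≠ q := by
  unfold ltSwap at h
  simp only [Bool.or_eq_true, Bool.and_eq_true, decide_eq_true_eq, beq_iff_eq] at h
  constructor
  · unfold ordR
    rcases h with h | ⟨h1, h2⟩
    · exact Or.inl h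
    · exact Or.inr ⟨h1.symm, le_of_lt h2⟩
  · rcases h with h | ⟨h1, h2⟩
    · intro he; rw [he] at h; exact lt_irrefl _ h
    · intro he; rw [he] at h2; exact lt_irrefl _ h2

theorem ordR_trans (p q s : String × Int) (h1 : ordR p q) (h2 : ordR q s) : ordR p s := by
  unfold ordR at *
  rcases h1 with h1 | ⟨h1a, h1b⟩ <;> rcases h2 with h2 | ⟨h2a, h2b⟩
  · exact Or.inl (lt_trans h2 h1)
  · exact Or.inl (h2a ▸ h1)
  · exact Or.inl (h1a ▸ h2)
  · exact Or.inr ⟨h1a.trans h2a, le_trans h1b h2b⟩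

theorem ordR_antisymm (p q : String × Int) (h1 : ordR p q) (h2 : ordR q p) : p = q := by
  unfold ordR at *
  rcases h1 with h1 | ⟨h1a, h1b⟩ <;> rcases h2 with h2 | ⟨h2a, h2b⟩
  · exact absurd h1 (lt_asymm h2)
  · exact absurd h1 (h2a ▸ lt_irrefl _)
  · exact absurd h2 (h1a ▸ lt_irrefl _)
  · exact Prod.ext (le_antisymm h1b h2b) h1a

-- ---- structural characterisation of A's inner passOnce ----
-- one passOnce: carry the current docs[i] along the suffix, swapping when ltSwap fires
def passStep (s : (String × Int) × List (String × Int)) (x : String × Int) : (String × Int) × List (String × Int) :=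
  if ltSwap s.1 x then (x, s.2 ++ [s.1]) else (s.1, s.2 ++ [x])

def passOnce (cur : String × Int) (suf : List (String × Int)) : (String × Int) × List (String × Int) :=
  suf.foldl passStep (cur, [])

theorem passOnce_invariant (suf : List (String × Int)) (cur : String × Int)
    (acc : List (String × Int)) (hacc : ∀ y ∈ acc, ordR cur y) :
    ((suf.foldl passStep (cur, acc)).1 :: (suf.foldl passStep (cur, acc)).2).Perm (cur :: (acc ++ suf)) ∧
      (∀ y ∈ (suf.foldl passStep (cur, acc)).2, ordR (suf.foldl passStep (cur, acc)).1 y) := by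
  induction suf generalizing cur acc with
  | nil => exact ⟨by simp, hacc⟩
  | cons x rest ih =>
    simp only [List.foldl_cons]
    unfold passStep
    by_cases hs : ltSwap cur x = true
    · simp only [hs, if_true]
      obtain ⟨hord, _⟩ := ordR_of_ltSwap cur x hs
      have hacc' : ∀ y ∈ acc ++ [cur], ordR x y := by
        intro y hy
        rcases List.mem_append.mp hy with hy | hy
        · exact ordR_trans _ _ _ hord (hacc y hy)
        · simp only [List.mem_singleton] at hy; exact hy ▸ hord
      obtain ⟨hp, hm⟩ := ih x (acc ++ [cur]) hacc'
      refine ⟨hp.trans ?_, hm⟩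
      refine List.perm_iff_count.mpr (fun a => ?_)
      simp [List.count_append, List.count_cons]
      omega
    · simp only [hs]
      have hacc' : ∀ y ∈ acc ++ [x], ordR cur y := by
        intro y hy
        rcases List.mem_append.mp hy with hy | hy
        · exact hacc y hy
        · simp only [List.mem_singleton] at hy
          exact hy ▸ ordR_of_not_ltSwap cur x (by simpa using hs)
      obtain ⟨hp, hm⟩ := ih cur (acc ++ [x]) hacc'
      refine ⟨hp.trans ?_, hm⟩
      refine List.perm_iff_count.mpr (fun a => ?_)
      simp [List.count_append, List.count_cons]

theorem passOnce_perm (cur : String × Int) (suf : List (String × Int)) :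
    ((passOnce cur suf).1 :: (passOnce cur suf).2).Perm (cur :: suf) := by
  have h := (passOnce_invariant suf cur [] (by simp)).1
  unfold passOnce
  simpa using h

theorem passOnce_length (cur : String × Int) (suf : List (String × Int)) :
    (passOnce cur suf).2.length = suf.length := by
  have h := (passOnce_perm cur suf).length_eq
  simpa using h

theorem passOnce_max (cur : String × Int) (suf : List (String × Int)) :
    ∀ y ∈ (passOnce cur suf).2, ordR (passOnce cur suf).1 y := by
  have h := (passOnce_invariant suf cur [] (by simp)).2
  unfold passOnce
  simpa using h

-- selection sort built from passes
def selsort : List (String × Int) → List (String × Int)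
  | [] => []
  | x :: xs =>
    let p := passOnce x xs
    p.1 :: selsort p.2
termination_by l => l.length
decreasing_by simp [passOnce_length]

theorem selsort_perm (l : List (String × Int)) : (selsort l).Perm l := by
  induction l using selsort.induct with
  | case1 => simp [selsort]
  | case2 x xs p ih =>
    rw [selsort]
    exact (List.Perm.cons p.1 ih).trans (passOnce_perm x xs)

theorem selsort_pairwise (l : List (String × Int)) : (selsort l).Pairwise ordR := by
  induction l using selsort.induct with
  | case1 => simp [selsort]
  | case2 x xs p ih =>
    rw [selsort]
    refine List.pairwise_cons.mpr ⟨fun y hy => ?_, ih⟩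
    exact passOnce_max x xs y ((selsort_perm p.2).mem_iff.mp hy)

-- one inner pass of A's double loop, done at row i = pre.length, equals passOnce
theorem inner_fold (suf : List (String × Int)) (pre mid : List (String × Int)) (cur : String × Int)
    (n : Int) (hn : n = pre.length + 1 + mid.length + suf.length) :
    (PySem.List.pyRange ((pre.length : Int) + 1 + mid.length) n 1).foldl (fun ds j =>
        if ltSwap (PySem.List.pyGetD ds (pre.length : Int) ("", 0)) (PySem.List.pyGetD ds j ("", 0)) then
          PySem.List.pySetD (PySem.List.pySetD ds (pre.length : Int) (PySem.List.pyGetD ds j ("", 0))) j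
            (PySem.List.pyGetD ds (pre.length : Int) ("", 0))
        else ds)
      (pre ++ cur :: (mid ++ suf))
    = pre ++ (suf.foldl passStep (cur, mid)).1 :: (suf.foldl passStep (cur, mid)).2 := by
  induction suf generalizing cur mid with
  | nil =>
    rw [PySem.List.pyRange_one_eq_nil (by simp [hn])]
    simp
  | cons x rest ih =>
    have hlt : (pre.length : Int) + 1 + mid.length < n := by
      simp only [hn, List.length_cons]; push_cast; omega
    rw [PySem.List.pyRange_one_cons hlt, List.foldl_cons]
    have hsplit : pre ++ cur :: (mid ++ x :: rest) = (pre ++ cur :: mid) ++ x :: rest := by simp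
    have hlen : ((pre ++ cur :: mid).length : Int) = (pre.length : Int) + 1 + mid.length := by
      simp; omega
    have hgi : PySem.List.pyGetD (pre ++ cur :: (mid ++ x :: rest)) (pre.length : Int) ("", 0) = cur := by
      rw [PySem.List.pyGetD_natCast]
      simp [List.getD]
    have hgj : PySem.List.pyGetD (pre ++ cur :: (mid ++ x :: rest)) ((pre.length : Int) + 1 + mid.length) ("", 0) = x := by
      rw [hsplit, ← hlen, PySem.List.pyGetD_natCast]
      simp [List.getD]
    simp only [hgi, hgj]
    by_cases hs : ltSwap cur x = true
    · simp only [hs, if_true]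
      have hset : PySem.List.pySetD (PySem.List.pySetD (pre ++ cur :: (mid ++ x :: rest)) (pre.length : Int) x) ((pre.length : Int) + 1 + mid.length) cur
          = pre ++ x :: ((mid ++ [cur]) ++ rest) := by
        rw [PySem.List.pySetD_natCast]
        have h1 : (pre ++ cur :: (mid ++ x :: rest)).set pre.length x = pre ++ x :: (mid ++ x :: rest) := by simp
        rw [h1]
        have h2 : pre ++ x :: (mid ++ x :: rest) = (pre ++ x :: mid) ++ x :: rest := by simp
        have hlen2 : ((pre ++ x :: mid).length : Int) = (pre.length : Int) + 1 + mid.length := by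
          simp; omega
        rw [h2, ← hlen2, PySem.List.pySetD_natCast]
        simp
      rw [hset]
      have := ih (mid ++ [cur]) x (by simp only [hn, List.length_append, List.length_cons, List.length_nil]; push_cast; omega)
      have harith : ((pre.length : Int) + 1 + mid.length) + 1 = (pre.length : Int) + 1 + ((mid ++ [cur]).length : Int) := by
        simp; omega
      rw [harith, this]
      simp [passStep, hs]
    · simp only [hs, Bool.false_eq_true, if_false]
      have hassoc : pre ++ cur :: (mid ++ x :: rest) = pre ++ cur :: ((mid ++ [x]) ++ rest) := by simp
      rw [hassoc]
      have := ih (mid ++ [x]) cur (by simp only [hn, List.length_append, List.length_cons, List.length_nil]; push_cast; omega)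
      have harith : ((pre.length : Int) + 1 + mid.length) + 1 = (pre.length : Int) + 1 + ((mid ++ [x]).length : Int) := by
        simp; omega
      rw [harith, this]
      simp [passStep, hs]

-- the outer loop starting after a settled prefix equals appending selsort of the rest
theorem outer_fold (rest : List (String × Int)) (pre : List (String × Int))
    (n : Int) (hn : n = pre.length + rest.length) :
    (PySem.List.pyRange (pre.length : Int) (n - 1) 1).foldl (fun ds i =>
        (PySem.List.pyRange (i + 1) n 1).foldl (fun ds j =>
          if ltSwap (PySem.List.pyGetD ds i ("", 0)) (PySem.List.pyGetD ds j ("", 0)) then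
            PySem.List.pySetD (PySem.List.pySetD ds i (PySem.List.pyGetD ds j ("", 0))) j
              (PySem.List.pyGetD ds i ("", 0))
          else ds) ds)
      (pre ++ rest)
    = pre ++ selsort rest := by
  induction rest using selsort.induct generalizing pre with
  | case1 =>
    rw [PySem.List.pyRange_one_eq_nil (by simp [hn])]
    simp [selsort]
  | case2 x xs p ih =>
    by_cases hxs : xs = []
    · subst hxs
      rw [PySem.List.pyRange_one_eq_nil (by simp [hn])]
      simp [selsort, passOnce]
    · have hlt : (pre.length : Int) < n - 1 := by
        have : 1 ≤ xs.length := by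
          cases xs with
          | nil => exact absurd rfl hxs
          | cons a b => simp
        simp only [hn, List.length_cons]; push_cast; omega
      rw [PySem.List.pyRange_one_cons hlt, List.foldl_cons]
      have hinner := inner_fold xs pre [] x n (by simp only [hn, List.length_cons, List.length_nil]; push_cast; omega)
      simp only [List.nil_append, List.length_nil, Nat.cast_zero, add_zero] at hinner
      rw [hinner]
      have hp1 : (xs.foldl passStep (x, [])).1 = p.1 := by simp [p, passOnce]
      have hp2 : (xs.foldl passStep (x, [])).2 = p.2 := by simp [p, passOnce]
      rw [hp1, hp2]
      have hre : pre ++ p.1 :: p.2 = (pre ++ [p.1]) ++ p.2 := by simp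
      have hlen : ((pre ++ [p.1]).length : Int) = (pre.length : Int) + 1 := by simp
      have := ih (pre ++ [p.1]) (by
        show n = ((pre ++ [p.1]).length : Int) + ((passOnce x xs).2.length : Int)
        have hl := passOnce_length x xs
        simp only [List.length_append, List.length_cons, List.length_nil, hn, hl]
        push_cast
        omega)
      rw [hre, ← hlen, this]
      simp [selsort]
      exact ⟨rfl, rfl⟩

-- the double index loop of A equals selsort
theorem exchange_eq_selsort (docs : List (String × Int)) :
    (PySem.List.pyRange 0 ((docs.length : Int) - 1) 1).foldl (fun ds i =>
      (PySem.List.pyRange (i + 1) (docs.length : Int) 1).foldl (fun ds j =>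
        if ltSwap (PySem.List.pyGetD ds i ("", 0)) (PySem.List.pyGetD ds j ("", 0)) then
          PySem.List.pySetD (PySem.List.pySetD ds i (PySem.List.pyGetD ds j ("", 0))) j
            (PySem.List.pyGetD ds i ("", 0))
        else ds) ds) docs
    = selsort docs := by
  have h := outer_fold docs [] (docs.length : Int) (by simp)
  simpa using h

-- uniqueness: two ordR-pairwise permutations are equal
theorem eq_of_perm_of_pairwise_ordR {l1 l2 : List (String × Int)} (hp : l1.Perm l2)
    (h1 : l1.Pairwise ordR) (h2 : l2.Pairwise ordR) : l1 = l2 :=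
  List.Perm.eq_of_pairwise (fun a b _ _ ha hb => ordR_antisymm a b ha hb) h1 h2 hp

-- B's pair-level list
def docsOf (dataSource : List (List String)) (tags : List String) : List (String × Int) :=
  (dataSource.filter (fun d => scoreB tags d ≠ 0)).map (fun d => (d.headD "", scoreB tags d))

def bPairs (dataSource : List (List String)) (tags : List String) : List (String × Int) :=
  (PySem.List.pyRange (tags.length : Int) 0 (-1)).flatMap (fun c =>
    (PySem.List.sorted (((docsOf dataSource tags).filter (fun p => p.2 == c)).map (fun p => p.1)) (fun x => x) false).map (fun s => (s, c)))

-- score as it appears in A's counting loop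
theorem count_eq_score (tags d : List String) :
    ((tags.countP (fun t => d.contains t) : Nat) : Int) = scoreB tags d := by
  simp [scoreB, List.countP_eq_length_filter]

-- partitioning a list by the (covering, duplicate-free) values of a key
theorem perm_flatMap_filter (key : (String × Int) → Int) (cs : List Int) (l : List (String × Int))
    (hnd : cs.Nodup) (hcov : ∀ x ∈ l, key x ∈ cs) :
    (cs.flatMap (fun c => l.filter (fun x => key x == c))).Perm l := by
  induction cs generalizing l with
  | nil =>
    have hl : l = [] := List.eq_nil_iff_forall_not_mem.mpr (fun x hx => by simpa using hcov x hx)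
    simp [hl]
  | cons c cs ih =>
    rw [List.flatMap_cons]
    have hstep : ∀ c' ∈ cs, l.filter (fun x => key x == c')
        = (l.filter (fun x => !(key x == c))).filter (fun x => key x == c') := by
      intro c' hc'
      rw [List.filter_filter]
      refine List.filter_congr (fun x _ => ?_)
      by_cases hx : key x = c'
      · have hcc : ¬ c' = c := fun h => (List.nodup_cons.mp hnd).1 (h ▸ hc')
        simp [hx, hcc]
      · simp [hx]
    have hfl : cs.flatMap (fun c' => l.filter (fun x => key x == c'))
        = cs.flatMap (fun c' => (l.filter (fun x => !(key x == c))).filter (fun x => key x == c')) := by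
      simp only [List.flatMap]
      exact congrArg List.flatten (List.map_congr_left hstep)
    rw [hfl]
    have hcov' : ∀ x ∈ l.filter (fun x => !(key x == c)), key x ∈ cs := by
      intro x hx
      obtain ⟨hxl, hxc⟩ := List.mem_filter.mp hx
      have := hcov x hxl
      simp only [List.mem_cons] at this
      rcases this with h | h
      · simp [h] at hxc
      · exact h
    have hperm := ih (l.filter (fun x => !(key x == c))) (List.nodup_cons.mp hnd).2 hcov'
    exact ((List.Perm.append_left _ hperm).trans (List.filter_append_perm _ l))

theorem scoreB_nonneg (tags d : List String) : 0 ≤ scoreB tags d := by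
  simp [scoreB]

theorem scoreB_le (tags d : List String) : scoreB tags d ≤ (tags.length : Int) := by
  simp only [scoreB]
  exact_mod_cast List.length_filter_le _ _

theorem bPairs_perm (dataSource : List (List String)) (tags : List String) :
    (bPairs dataSource tags).Perm (docsOf dataSource tags) := by
  unfold bPairs
  have hblock : ∀ c ∈ PySem.List.pyRange (tags.length : Int) 0 (-1),
      ((PySem.List.sorted (((docsOf dataSource tags).filter (fun p => p.2 == c)).map (fun p => p.1)) (fun x => x) false).map (fun s => (s, c))).Perm
        ((docsOf dataSource tags).filter (fun x => x.2 == c)) := by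
    intro c _
    have h1 := (PySem.List.sorted_perm (((docsOf dataSource tags).filter (fun p => p.2 == c)).map (fun p => p.1)) (fun x => x) false).map (fun s => (s, c))
    have h2 : (((docsOf dataSource tags).filter (fun p => p.2 == c)).map (fun p => p.1)).map (fun s => (s, c))
        = (docsOf dataSource tags).filter (fun x => x.2 == c) := by
      rw [List.map_map]
      have := List.map_congr_left (l := (docsOf dataSource tags).filter (fun p => p.2 == c))
        (f := (fun s => (s, c)) ∘ fun p => p.1) (g := id) (fun p hp => by
          have := (List.mem_filter.mp hp).2
          simp only [beq_iff_eq] at this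
          simp [Function.comp, ← this])
      rw [this, List.map_id]
    rw [h2] at h1
    exact h1
  refine (List.Perm.flatMap_left _ hblock).trans ?_
  refine perm_flatMap_filter (fun p => p.2) _ _ ?_ ?_
  · rw [PySem.List.pyRange_neg_one_eq_reverse]
    exact List.nodup_reverse.mpr (PySem.List.nodup_pyRange_one _ _)
  · intro x hx
    unfold docsOf at hx
    obtain ⟨d, hd, hfd⟩ := List.mem_map.mp hx
    have hne : scoreB tags d ≠ 0 := by
      have := (List.mem_filter.mp hd).2
      simpa using this
    rw [PySem.List.mem_pyRange_neg_one, ← hfd]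
    have h0 := scoreB_nonneg tags d
    have h1 := scoreB_le tags d
    constructor
    · simp only []
      omega
    · simpa using h1

theorem bPairs_pairwise (dataSource : List (List String)) (tags : List String) :
    (bPairs dataSource tags).Pairwise ordR := by
  unfold bPairs
  rw [List.pairwise_flatMap]
  constructor
  · intro c _
    rw [List.pairwise_map]
    have hs := PySem.List.sorted_pairwise (((docsOf dataSource tags).filter (fun p => p.2 == c)).map (fun p => p.1)) (fun x => x)
    exact hs.imp (fun h => Or.inr ⟨rfl, h⟩)
  · have hdec : (PySem.List.pyRange (tags.length : Int) 0 (-1)).Pairwise (fun c1 c2 => c2 < c1) := by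
      rw [PySem.List.pyRange_neg_one_eq_reverse, List.pairwise_reverse]
      exact PySem.List.pairwise_lt_pyRange_one _ _
    refine hdec.imp ?_
    intro c1 c2 h x hx y hy
    obtain ⟨s1, _, hx1⟩ := List.mem_map.mp hx
    obtain ⟨s2, _, hy1⟩ := List.mem_map.mp hy
    exact Or.inl (by rw [← hx1, ← hy1]; exact h)

-- the bucket for count c holds exactly the ids of the scored rows with count c, in row order
theorem buckets_getD (dataSource : List (List String)) (tags : List String) (c : Int) :
    (dataSource.foldl (fun b d =>
        if scoreB tags d ≠ 0 then b.insert (scoreB tags d) ((b.getD (scoreB tags d) []) ++ [d.headD ""]) else b)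
      PySem.Dict.empty).getD c []
    = ((docsOf dataSource tags).filter (fun p => p.2 == c)).map (fun p => p.1) := by
  induction dataSource using List.reverseRecOn with
  | nil => simp [docsOf]
  | append_singleton l d ih =>
    rw [List.foldl_append, List.foldl_cons, List.foldl_nil]
    have hdocs : docsOf (l ++ [d]) tags
        = docsOf l tags ++ (if scoreB tags d ≠ 0 then [(d.headD "", scoreB tags d)] else []) := by
      unfold docsOf
      rw [List.filter_append, List.map_append]
      by_cases hs : scoreB tags d ≠ 0 <;> simp [hs]
    by_cases hs : scoreB tags d ≠ 0
    · rw [if_pos hs, hdocs, if_pos hs]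
      rw [PySem.Dict.getD_insert]
      rw [List.filter_append, List.map_append]
      by_cases hc : c = scoreB tags d
      · rw [if_pos hc, ← hc, ih]
        simp
      · rw [if_neg hc, ih]
        have hb : (((d.headD "", scoreB tags d) : String × Int).2 == c) = false := by
          simp only [beq_eq_false_iff_ne, ne_eq]
          exact fun h => hc h.symm
        simp [hb]
    · rw [if_neg hs, hdocs, if_neg hs, List.append_nil]
      exact ih

theorem solution_alt_eq (dataSource : List (List String)) (tags : List String) :
    solution_alt dataSource tags = ((bPairs dataSource tags).map (fun p => p.1)).take 10 := by
  unfold solution_alt bPairs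
  simp only [buckets_getD]
  simp only [PySem.List.foldl_append_eq_flatMap, List.nil_append, List.map_flatMap]
  rw [show ((10 : Int)) = ((10 : Nat) : Int) from rfl, PySem.List.slice_to_natCast]
  simp [Function.comp_def]

theorem solution_eq (dataSource : List (List String)) (tags : List String) :
    solution dataSource tags = ((selsort (docsOf dataSource tags)).map (fun p => p.1)).take 10 := by
  unfold solution
  simp only [PySem.List.foldl_if_add_one, zero_add]
  rw [show (fun (docs : List (String × Int)) (data : List String) =>
        if (tags.countP (fun t => data.contains t) : Int) ≠ 0 then
          docs ++ [(data.headD "", (tags.countP (fun t => data.contains t) : Int))]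
        else docs)
      = (fun docs data =>
        if scoreB tags data ≠ 0 then docs ++ [(data.headD "", scoreB tags data)] else docs) from by
        funext docs data; rw [count_eq_score]]
  rw [PySem.List.foldl_append_ite (p := fun d => scoreB tags d ≠ 0) (f := fun d => (d.headD "", scoreB tags d))]
  rw [List.nil_append]
  have hdocs : (dataSource.filter (fun d => decide (scoreB tags d ≠ 0))).map (fun d => (d.headD "", scoreB tags d)) = docsOf dataSource tags := rfl
  rw [hdocs, exchange_eq_selsort]
  rw [show ((10 : Int)) = ((10 : Nat) : Int) from rfl, PySem.List.slice_to_natCast]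

-- ===== VERDICT (by name: the statement is the Claim_ definition above) =====
theorem solution_spec : Claim_equal_solution := by
  intro dataSource tags _
  unfold Spec_solution
  rw [solution_eq, solution_alt_eq]
  have h := eq_of_perm_of_pairwise_ordR
    ((selsort_perm (docsOf dataSource tags)).trans (bPairs_perm dataSource tags).symm)
    (selsort_pairwise _) (bPairs_pairwise dataSource tags)
  rw [h]
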